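-- pv_equiv track=rewrite | github.com/djessenb/aws-agents-test | module7/app.py | _normalize_store_content
-- ===== SOURCE A (Python) =====
-- def _normalize_store_content(raw: str) -> str:
--     text = (raw or "").strip()
--     lower = text.lower()
--     prefixes = [
--         "remember that ",
--         "remember ",
--         "save that ",
--         "save ",
--         "store that ",
--         "store ",
--         "note that ",
--         "record that ",
--     ]
--     for p in prefixes:
--         if lower.startswith(p):
--             # Remove the prefix using original text length for proper casing
--             return text[len(p):].strip()
--     return text
-- ===== SOURCE B (Python) =====
-- _RULES = {"remember": True, "save": True, "store": True, "note": False, "record": False}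
--
-- def _normalize_store_content(raw: str) -> str:
--     text = (raw or "").strip()
--     lower = text.lower()
--     head, sep, _ = lower.partition(" ")
--     allow_bare = _RULES.get(head)
--     if sep and allow_bare is not None:
--         n = len(head) + 1
--         if lower.startswith("that ", n):
--             n += 5
--         elif not allow_bare:
--             return text
--         return text[n:].strip()
--     return text
-- ===== Notes on version B (the rewrite author's own statement) =====
-- stated objective: alternative
-- what changed: Replaces A's linear scan over eight literal prefixes with a first-word dispatch: partition the lowered text at the first space, look the first word up in a rule table, and strips one optional that-word continuation.
import Mathlib
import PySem

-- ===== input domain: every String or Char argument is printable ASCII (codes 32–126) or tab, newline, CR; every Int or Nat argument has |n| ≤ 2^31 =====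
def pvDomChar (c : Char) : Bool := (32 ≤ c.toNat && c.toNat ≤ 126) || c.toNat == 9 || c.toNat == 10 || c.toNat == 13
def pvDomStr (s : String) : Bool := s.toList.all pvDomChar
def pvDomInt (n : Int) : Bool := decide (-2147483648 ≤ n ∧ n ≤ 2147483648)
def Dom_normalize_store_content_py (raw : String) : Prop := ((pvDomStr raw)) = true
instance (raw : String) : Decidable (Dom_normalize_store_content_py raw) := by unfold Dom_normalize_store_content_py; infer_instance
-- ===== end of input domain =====

-- B replaces A's scan over eight string prefixes by a first-word dispatch (partition at the
-- first space, rule table lookup, one optional "that " check); objective: alternative structure.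

-- ===== PORT A =====
-- the prefix list of A, in A's order
def pvPrefixesA : List (List Char) :=
  ["remember that ".toList, "remember ".toList, "save that ".toList, "save ".toList,
   "store that ".toList, "store ".toList, "note that ".toList, "record that ".toList]

-- A's for-loop with early return: first matching prefix wins
def pvLoopA (text lower : List Char) : List (List Char) → List Char
  | [] => text
  | p :: ps =>
    if PySem.Chars.startswith lower p then
      -- text[len(p):].strip()
      PySem.Chars.strip (PySem.List.slice text (some (p.length : Int)) none)
    else pvLoopA text lower ps

def normalize_store_content_py (raw : String) : String :=
  -- text = (raw or "").strip(); for a str, (raw or "") is "" when raw is empty, else raw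
  let text := PySem.Chars.strip (if raw.toList = [] then [] else raw.toList)
  let lower := PySem.Chars.lower text
  String.ofList (pvLoopA text lower pvPrefixesA)

-- ===== PORT B =====
-- hand port of str.partition(" ") (exact: head before first space, the separator, the rest)
def pvPartitionSpace (l : List Char) : List Char × List Char × List Char :=
  if ' ' ∈ l then (l.takeWhile (· ≠ ' '), [' '], (l.dropWhile (· ≠ ' ')).tail)
  else (l, [], [])

-- _RULES: first word ↦ whether the bare word (without "that") is already a prefix
def pvRulesB : PySem.Dict (List Char) Bool :=
  PySem.Dict.mk [("remember".toList, true), ("save".toList, true), ("store".toList, true),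
                 ("note".toList, false), ("record".toList, false)]

-- B's core on the stripped text and its lowercase form
def pvCoreB (text lower : List Char) : List Char :=
  let parts := pvPartitionSpace lower
  let head := parts.1
  let sep := parts.2.1
  match PySem.Dict.get? pvRulesB head with   -- allow_bare = _RULES.get(head)
  | some allowBare =>
    if sep ≠ [] then                         -- if sep and allow_bare is not None
      let n := head.length + 1
      if PySem.Chars.startswith (lower.drop n) "that ".toList then
        -- lower.startswith("that ", n) with 0 ≤ n, then return text[n+5:].strip()
        PySem.Chars.strip (text.drop (n + 5))
      else if allowBare = false then text    -- elif not allow_bare: return text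
      else PySem.Chars.strip (text.drop n)   -- return text[n:].strip()
    else text
  | none => text

def normalize_store_content_py_alt (raw : String) : String :=
  let text := PySem.Chars.strip (if raw.toList = [] then [] else raw.toList)
  let lower := PySem.Chars.lower text
  String.ofList (pvCoreB text lower)

-- ===== PRECONDITION & SPEC =====
def Spec_normalize_store_content_py (raw : String) (out : String) : Prop := out = normalize_store_content_py_alt raw
instance (raw : String) (out : String) : Decidable (Spec_normalize_store_content_py raw out) := by unfold Spec_normalize_store_content_py; infer_instance

-- ===== CLAIM (what is proved, stated in full; the proofs are below) =====
def Claim_equal_normalize_store_content_py : Prop := ∀ (raw : String), Dom_normalize_store_content_py raw → Spec_normalize_store_content_py raw (normalize_store_content_py raw)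

-- ===== LEMMAS AND PROOFS =====

-- (w ++ ' ' :: r) is a prefix of l iff l's first space-delimited word is w and r follows it
theorem pv_word_prefix_iff : ∀ (w r l : List Char), (∀ c ∈ w, c ≠ ' ') →
    ((w ++ ' ' :: r) <+: l ↔
      (' ' ∈ l ∧ l.takeWhile (· ≠ ' ') = w ∧ r <+: l.drop (w.length + 1)))
  | [], r, [], _ => by simp
  | [], r, c :: l', _ => by
    by_cases hc : c = ' '
    · subst hc; simp [List.takeWhile_cons, List.cons_prefix_cons]
    · simp [List.takeWhile_cons, hc, List.cons_prefix_cons, Ne.symm hc]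
  | a :: w', r, [], _ => by simp
  | a :: w', r, c :: l', hw => by
    have ha : a ≠ ' ' := hw a (List.mem_cons_self ..)
    have ih := pv_word_prefix_iff w' r l' (fun x hx => hw x (List.mem_cons_of_mem _ hx))
    by_cases hc : a = c
    · cases hc
      rw [List.cons_append, List.cons_prefix_cons, ih]
      have f3 : List.takeWhile (fun x => decide (x ≠ ' ')) (a :: l')
          = a :: List.takeWhile (fun x => decide (x ≠ ' ')) l' := by
        rw [List.takeWhile_cons]; simp [ha]
      rw [List.length_cons, f3]
      simp only [List.mem_cons, List.cons.injEq, List.drop_succ_cons, true_and]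
      constructor
      · rintro ⟨h1, h2, h3⟩
        exact ⟨Or.inr h1, h2, h3⟩
      · rintro ⟨h1, h2, h3⟩
        have h1' : ' ' ∈ l' := by
          rcases h1 with h | h
          · exact absurd h.symm ha
          · exact h
        exact ⟨h1', h2, h3⟩
    · constructor
      · intro h
        rw [List.cons_append, List.cons_prefix_cons] at h
        exact absurd h.1 hc
      · rintro ⟨-, h2, -⟩
        by_cases hcs : c = ' '
        · rw [List.takeWhile_cons] at h2
          simp [hcs] at h2
        · rw [List.takeWhile_cons] at h2
          simp only [hcs, ne_eq, not_false_eq_true, decide_true, if_true,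
            List.cons.injEq] at h2
          exact absurd h2.1.symm hc

-- one-word form: (w ++ " ") is a prefix of l iff l's first word is w and l contains a space
theorem pv_word_prefix_iff' (w l : List Char) (hw : ∀ c ∈ w, c ≠ ' ') :
    (w ++ [' ']) <+: l ↔ (' ' ∈ l ∧ l.takeWhile (· ≠ ' ') = w) := by
  have := pv_word_prefix_iff w [] l hw
  simpa using this

-- reduce B's match once the rule lookup is known
theorem pv_matchB (t l w : List Char) (allow : Bool)
    (hg : PySem.Dict.get? pvRulesB w = some allow) :
    (match PySem.Dict.get? pvRulesB w with
     | some allowBare =>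
       if PySem.Chars.startswith (l.drop (w.length + 1)) "that ".toList then
         PySem.Chars.strip (t.drop (w.length + 1 + 5))
       else if allowBare = false then t
       else PySem.Chars.strip (t.drop (w.length + 1))
     | none => t)
    = (if PySem.Chars.startswith (l.drop (w.length + 1)) "that ".toList then
         PySem.Chars.strip (t.drop (w.length + 1 + 5))
       else if allow = false then t
       else PySem.Chars.strip (t.drop (w.length + 1))) := by
  rw [hg]

set_option maxRecDepth 4000 in
-- A's loop equals B's core on any text/lower pair
theorem pv_core_eq (t l : List Char) : pvLoopA t l pvPrefixesA = pvCoreB t l := by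
  by_cases hsp : ' ' ∈ l
  · set h := l.takeWhile (· ≠ ' ') with hh
    have conv1 : ∀ (w : List Char), (∀ c ∈ w, c ≠ ' ') →
        (PySem.Chars.startswith l (w ++ ' ' :: "that ".toList) = true ↔
          (h = w ∧ PySem.Chars.startswith (l.drop (w.length + 1)) "that ".toList = true)) := by
      intro w hw
      rw [PySem.Chars.startswith_iff, pv_word_prefix_iff w _ l hw,
          PySem.Chars.startswith_iff]
      tauto
    have conv2 : ∀ (w : List Char), (∀ c ∈ w, c ≠ ' ') →
        (PySem.Chars.startswith l (w ++ [' ']) = true ↔ h = w) := by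
      intro w hw
      rw [PySem.Chars.startswith_iff, pv_word_prefix_iff' w l hw]
      tauto
    -- the eight prefixes, written as word ++ space ++ rest
    have e1 : "remember that ".toList = "remember".toList ++ ' ' :: "that ".toList := rfl
    have e2 : "remember ".toList = "remember".toList ++ [' '] := rfl
    have e3 : "save that ".toList = "save".toList ++ ' ' :: "that ".toList := rfl
    have e4 : "save ".toList = "save".toList ++ [' '] := rfl
    have e5 : "store that ".toList = "store".toList ++ ' ' :: "that ".toList := rfl
    have e6 : "store ".toList = "store".toList ++ [' '] := rfl
    have e7 : "note that ".toList = "note".toList ++ ' ' :: "that ".toList := rfl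
    have e8 : "record that ".toList = "record".toList ++ ' ' :: "that ".toList := rfl
    have hB : pvCoreB t l =
        (match PySem.Dict.get? pvRulesB h with
         | some allowBare =>
             if PySem.Chars.startswith (l.drop (h.length + 1)) "that ".toList then
               PySem.Chars.strip (t.drop (h.length + 1 + 5))
             else if allowBare = false then t
             else PySem.Chars.strip (t.drop (h.length + 1))
         | none => t) := by
      simp only [pvCoreB, pvPartitionSpace, if_pos hsp, ← hh]
      cases PySem.Dict.get? pvRulesB h with
      | none => rfl
      | some b => simp
    rw [hB]
    simp only [pvLoopA, pvPrefixesA]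
    rw [e1, e2, e3, e4, e5, e6, e7, e8]
    by_cases h1 : h = "remember".toList
    · rw [h1, pv_matchB t l _ true rfl]
      by_cases ht : PySem.Chars.startswith (l.drop ("remember".toList.length + 1)) "that ".toList = true
      · rw [if_pos ((conv1 _ (by simp)).2 ⟨h1, ht⟩), if_pos ht,
           PySem.List.slice_from_natCast]
        rfl
      · rw [if_neg (fun hx => ht ((conv1 _ (by simp)).1 hx).2),
           if_pos ((conv2 _ (by simp)).2 h1), if_neg ht, if_neg (by decide : ¬((true : Bool) = false)),
           PySem.List.slice_from_natCast]
        rfl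
    · rw [if_neg (fun hx => h1 ((conv1 _ (by simp)).1 hx).1),
         if_neg (fun hx => h1 ((conv2 _ (by simp)).1 hx))]
      by_cases h2 : h = "save".toList
      · rw [h2, pv_matchB t l _ true rfl]
        by_cases ht : PySem.Chars.startswith (l.drop ("save".toList.length + 1)) "that ".toList = true
        · rw [if_pos ((conv1 _ (by simp)).2 ⟨h2, ht⟩), if_pos ht,
             PySem.List.slice_from_natCast]
          rfl
        · rw [if_neg (fun hx => ht ((conv1 _ (by simp)).1 hx).2),
             if_pos ((conv2 _ (by simp)).2 h2), if_neg ht, if_neg (by decide : ¬((true : Bool) = false)),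
             PySem.List.slice_from_natCast]
          rfl
      · rw [if_neg (fun hx => h2 ((conv1 _ (by simp)).1 hx).1),
           if_neg (fun hx => h2 ((conv2 _ (by simp)).1 hx))]
        by_cases h3 : h = "store".toList
        · rw [h3, pv_matchB t l _ true rfl]
          by_cases ht : PySem.Chars.startswith (l.drop ("store".toList.length + 1)) "that ".toList = true
          · rw [if_pos ((conv1 _ (by simp)).2 ⟨h3, ht⟩), if_pos ht,
               PySem.List.slice_from_natCast]
            rfl
          · rw [if_neg (fun hx => ht ((conv1 _ (by simp)).1 hx).2),
               if_pos ((conv2 _ (by simp)).2 h3), if_neg ht, if_neg (by decide : ¬((true : Bool) = false)),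
               PySem.List.slice_from_natCast]
            rfl
        · rw [if_neg (fun hx => h3 ((conv1 _ (by simp)).1 hx).1),
             if_neg (fun hx => h3 ((conv2 _ (by simp)).1 hx))]
          by_cases h4 : h = "note".toList
          · rw [h4, pv_matchB t l _ false rfl]
            by_cases ht : PySem.Chars.startswith (l.drop ("note".toList.length + 1)) "that ".toList = true
            · rw [if_pos ((conv1 _ (by simp)).2 ⟨h4, ht⟩), if_pos ht,
                 PySem.List.slice_from_natCast]
              rfl
            · rw [if_neg (fun hx => ht ((conv1 _ (by simp)).1 hx).2),
                 if_neg (fun hx => (by simp : ("note".toList : List Char) ≠ "record".toList)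
                   (h4 ▸ ((conv1 _ (by simp)).1 hx).1)),
                 if_neg ht, if_pos rfl]
          · rw [if_neg (fun hx => h4 ((conv1 _ (by simp)).1 hx).1)]
            by_cases h5 : h = "record".toList
            · rw [h5, pv_matchB t l _ false rfl]
              by_cases ht : PySem.Chars.startswith (l.drop ("record".toList.length + 1)) "that ".toList = true
              · rw [if_pos ((conv1 _ (by simp)).2 ⟨h5, ht⟩), if_pos ht,
                   PySem.List.slice_from_natCast]
                rfl
              · rw [if_neg (fun hx => ht ((conv1 _ (by simp)).1 hx).2), if_neg ht, if_pos rfl]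
            · rw [if_neg (fun hx => h5 ((conv1 _ (by simp)).1 hx).1)]
              have hn : PySem.Dict.get? pvRulesB h = none := by
                simp only [pvRulesB, PySem.Dict.get?_mk_cons, beq_iff_eq]
                rw [if_neg (Ne.symm h1), if_neg (Ne.symm h2), if_neg (Ne.symm h3),
                    if_neg (Ne.symm h4), if_neg (Ne.symm h5)]
                rfl
              rw [hn]
  · -- no space in l: every prefix of A ends in a space, so none matches; B's sep is empty
    have hno : ∀ (p : List Char), ' ' ∈ p → PySem.Chars.startswith l p = false := by
      intro p hp
      rw [Bool.eq_false_iff]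
      intro hx
      exact hsp (((PySem.Chars.startswith_iff l p).1 hx).subset hp)
    simp only [pvLoopA, pvPrefixesA]
    rw [hno _ (by simp), hno _ (by simp), hno _ (by simp), hno _ (by simp),
        hno _ (by simp), hno _ (by simp), hno _ (by simp), hno _ (by simp)]
    simp only [Bool.false_eq_true, if_false]
    simp only [pvCoreB, pvPartitionSpace, if_neg hsp]
    cases PySem.Dict.get? pvRulesB l <;> simp

-- ===== VERDICT (by name: the statement is the Claim_ definition above) =====
theorem normalize_store_content_py_spec : Claim_equal_normalize_store_content_py := by
  intro raw _
  unfold Spec_normalize_store_content_py normalize_store_content_py normalize_store_content_py_alt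
  exact congrArg String.ofList (pv_core_eq _ _)
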